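-- pv_equiv track=rewrite | github.com/maniospas/pySynthesis | analysis.py | _deflatten
-- ===== SOURCE A (Python) =====
-- def _is_not_var_symbol(text):
--     valid_symbols = ".,!@#$%^/&*()-+={}[]:\t=<> "
--     if text in valid_symbols:
--         return True
--     return False
--
-- def _deflatten(expression, variable_expressions):
--     new_expression = ""
--     current_var = ""
--     for c in expression+" ":
--         if _is_not_var_symbol(c):
--             new_expression += variable_expressions.get(current_var, current_var)
--             current_var = ""
--             new_expression += c
--         else:
--             current_var += c
--     return new_expression[:-1]
-- ===== SOURCE B (Python) =====
-- import re
--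
-- _SYMBOL_SPLIT = re.compile(r'([.,!@#$%^/&*()\-+={}\[\]:\t=<> ])')
--
-- def _deflatten(expression, variable_expressions):
--     parts = _SYMBOL_SPLIT.split(expression)
--     return ''.join(variable_expressions.get(p, p) if i % 2 == 0 else p
--                    for i, p in enumerate(parts))
-- ===== Notes on version B (the rewrite author's own statement) =====
-- stated objective: idiomatic
-- what changed: Replaced A's character-by-character accumulator loop (with a sentinel trailing space and a final [:-1] strip) by one regex split on a capturing symbol class into alternating token/delimiter parts, joined with substitution applied only to the even-index token parts.
import Mathlib
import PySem

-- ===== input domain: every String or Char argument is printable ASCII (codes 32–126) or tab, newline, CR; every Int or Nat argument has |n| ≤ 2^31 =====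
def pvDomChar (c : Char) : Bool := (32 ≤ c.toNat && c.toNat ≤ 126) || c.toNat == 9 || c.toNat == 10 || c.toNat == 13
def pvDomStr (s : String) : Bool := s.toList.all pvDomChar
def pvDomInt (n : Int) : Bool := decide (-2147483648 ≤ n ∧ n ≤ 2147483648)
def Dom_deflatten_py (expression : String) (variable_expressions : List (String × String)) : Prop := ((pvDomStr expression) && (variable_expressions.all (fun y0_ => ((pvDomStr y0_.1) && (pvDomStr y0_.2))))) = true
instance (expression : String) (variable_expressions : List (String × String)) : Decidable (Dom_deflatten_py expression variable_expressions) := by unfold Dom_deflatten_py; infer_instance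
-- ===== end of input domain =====

-- B replaces A's per-character accumulator loop (sentinel space + [:-1]) by a regex split into
-- alternating token/delimiter parts followed by a join that substitutes only the even-index parts
-- (objective: idiomatic). Equivalence of the return value is proved on the whole domain.

-- dict.get(k, k): first-match association-list lookup (shared by both ports)
def pvGet (vs : List (String × String)) (k : String) : String :=
  match vs.find? (fun p => p.1 == k) with
  | some p => p.2
  | none => k

-- ===== PORT A =====
-- _is_not_var_symbol: 'text in valid_symbols' is Python substring membership → PySem.Str.isIn
def pvIsNotVarSymbol (text : String) : Bool :=
  if PySem.Str.isIn text ".,!@#$%^/&*()-+={}[]:\t=<> " then true else false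

def deflatten_py (expression : String) (variable_expressions : List (String × String)) : String :=
  -- the two growing strings new_expression / current_var are carried as their char lists
  let st := (expression.toList ++ [' ']).foldl
    (fun (st : List Char × List Char) c =>
      if pvIsNotVarSymbol (String.ofList [c]) then
        (st.1 ++ (pvGet variable_expressions (String.ofList st.2)).toList ++ [c], [])
      else
        (st.1, st.2 ++ [c])) ([], [])
  String.ofList (PySem.List.slice st.1 none (some (-1)))   -- new_expression[:-1]

-- ===== PORT B =====
-- the regex character class of Source B, as the set of chars it matches
def pvClass : List Char := ".,!@#$%^/&*()-+={}[]:\t=<> ".toList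

-- hand port of re.split with one capturing single-char class: exact — the result alternates
-- (possibly empty) non-delimiter runs at even indices with single captured delimiters at odd ones
def pvPrependTok (cur : List Char) : List (List Char) → List (List Char)
  | [] => [cur]
  | t :: r => (cur ++ t) :: r

def pvSplitSyms : List Char → List (List Char)
  | [] => [[]]
  | c :: rest =>
    if pvClass.contains c then [] :: [c] :: pvSplitSyms rest
    else pvPrependTok [c] (pvSplitSyms rest)

def deflatten_py_alt (expression : String) (variable_expressions : List (String × String)) : String :=
  let parts := pvSplitSyms expression.toList
  String.ofList
    (((PySem.List.enumerate parts).map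
      (fun ip => if PySem.Int.mod ip.1 2 == 0 then (pvGet variable_expressions (String.ofList ip.2)).toList else ip.2)).flatten)

-- ===== PRECONDITION & SPEC =====
def Spec_deflatten_py (expression : String) (variable_expressions : List (String × String)) (out : String) : Prop := out = deflatten_py_alt expression variable_expressions
instance (expression : String) (variable_expressions : List (String × String)) (out : String) : Decidable (Spec_deflatten_py expression variable_expressions out) := by unfold Spec_deflatten_py; infer_instance

-- ===== CLAIM (what is proved, stated in full; the proofs are below) =====
def Claim_equal_deflatten_py : Prop := ∀ (expression : String) (variable_expressions : List (String × String)), Dom_deflatten_py expression variable_expressions → Spec_deflatten_py expression variable_expressions (deflatten_py expression variable_expressions)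

-- ===== LEMMAS AND PROOFS =====

-- A's symbol test on a single character is membership in the character class
theorem pvIsNotVarSymbol_single (c : Char) :
    pvIsNotVarSymbol (String.ofList [c]) = pvClass.contains c := by
  have hinf : [c] <:+: pvClass ↔ c ∈ pvClass :=
    ⟨fun h => (List.singleton_sublist).1 h.sublist,
     fun h => by obtain ⟨s, t, hst⟩ := List.append_of_mem h; exact ⟨s, t, by rw [hst]; simp⟩⟩
  have key : PySem.Chars.isIn [c] pvClass = pvClass.contains c := by
    cases hb : PySem.Chars.isIn [c] pvClass with
    | true =>
        have hm := hinf.1 ((PySem.Chars.isIn_iff_infix _ _).1 hb)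
        simp [hm]
    | false =>
        have hm : ¬ c ∈ pvClass := fun hm => by
          have := (PySem.Chars.isIn_iff_infix [c] pvClass).2 (hinf.2 hm)
          rw [hb] at this; cases this
        simp [hm]
  simpa [pvIsNotVarSymbol, PySem.Str.isIn, pvClass] using key

-- shorthand used only in the proofs: the substituted value of a token
def pvL (vs : List (String × String)) (cur : List Char) : List Char :=
  (pvGet vs (String.ofList cur)).toList

-- what A's loop emits / what A's pending token is, as recursions over the remaining input
def pvJ (vs : List (String × String)) (cur : List Char) : List Char → List Char
  | [] => []
  | c :: cs => if pvClass.contains c then pvL vs cur ++ c :: pvJ vs [] cs else pvJ vs (cur ++ [c]) cs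

def pvT (cur : List Char) : List Char → List Char
  | [] => cur
  | c :: cs => if pvClass.contains c then pvT [] cs else pvT (cur ++ [c]) cs

-- A's loop body, with the symbol test reduced to class membership
def pvStepA (vs : List (String × String)) (st : List Char × List Char) (c : Char) :
    List Char × List Char :=
  if pvClass.contains c then
    (st.1 ++ (pvGet vs (String.ofList st.2)).toList ++ [c], [])
  else (st.1, st.2 ++ [c])

theorem pvStepA_eq (vs : List (String × String)) :
    (fun (st : List Char × List Char) c =>
      if pvIsNotVarSymbol (String.ofList [c]) then
        (st.1 ++ (pvGet vs (String.ofList st.2)).toList ++ [c], [])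
      else (st.1, st.2 ++ [c])) = pvStepA vs := by
  funext st c
  rw [pvStepA, pvIsNotVarSymbol_single]

-- A's fold, characterised
theorem pvFoldA (vs : List (String × String)) :
    ∀ (cs : List Char) (out cur : List Char),
      cs.foldl (pvStepA vs) (out, cur) = (out ++ pvJ vs cur cs, pvT cur cs) := by
  intro cs
  induction cs with
  | nil => intro out cur; simp [pvJ, pvT]
  | cons c cs ih =>
    intro out cur
    simp only [List.foldl_cons, pvStepA, pvJ, pvT]
    by_cases h : c ∈ pvClass
    · simp [h, ih, pvL, List.append_assoc]
    · simp [h, ih]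

-- appending the sentinel space flushes the pending token
theorem pvJ_append_space (vs : List (String × String)) :
    ∀ (cs : List Char) (cur : List Char),
      pvJ vs cur (cs ++ [' ']) = pvJ vs cur cs ++ pvL vs (pvT cur cs) ++ [' '] := by
  intro cs
  induction cs with
  | nil => intro cur; simp [pvJ, pvT, pvClass]
  | cons c cs ih =>
    intro cur
    simp only [List.cons_append, pvJ, pvT]
    by_cases h : c ∈ pvClass
    · simp [h, ih, List.append_assoc]
    · simp [h, ih]

-- alternating renderer for B's part list
def pvR (vs : List (String × String)) : Bool → List (List Char) → List Char
  | _, [] => []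
  | true, t :: r => pvL vs t ++ pvR vs false r
  | false, d :: r => d ++ pvR vs true r

-- B's enumerate/join comprehension is the alternating renderer
theorem pvEnumR (vs : List (String × String)) :
    ∀ (parts : List (List Char)) (s : Int),
      (((PySem.List.enumerate parts s).map
        (fun ip => if PySem.Int.mod ip.1 2 == 0 then (pvGet vs (String.ofList ip.2)).toList else ip.2)).flatten)
      = pvR vs (s % 2 == 0) parts := by
  intro parts
  induction parts with
  | nil => intro s; simp [PySem.List.enumerate, pvR]
  | cons p r ih =>
    intro s
    rw [PySem.List.enumerate_cons, List.map_cons, List.flatten_cons, ih (s + 1)]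
    rcases Int.emod_two_eq s with h | h
    · have h1 : (s + 1) % 2 = 1 := by omega
      simp [h, h1, pvR, pvL]
    · have h1 : (s + 1) % 2 = 0 := by omega
      simp [h, h1, pvR]

theorem pvPrependTok_prepend (cur c : List Char) (parts : List (List Char)) :
    pvPrependTok cur (pvPrependTok c parts) = pvPrependTok (cur ++ c) parts := by
  cases parts <;> simp [pvPrependTok]

theorem pvSplitSyms_ne_nil (cs : List Char) : pvSplitSyms cs ≠ [] := by
  cases cs with
  | nil => simp [pvSplitSyms]
  | cons c cs =>
    simp only [pvSplitSyms]
    split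
    · simp
    · cases pvSplitSyms cs <;> simp [pvPrependTok]

theorem pvPrependTok_nil (parts : List (List Char)) (h : parts ≠ []) :
    pvPrependTok [] parts = parts := by
  cases parts with
  | nil => exact absurd rfl h
  | cons t r => simp [pvPrependTok]

-- the renderer of the split equals A's emitted output plus the substituted pending token
theorem pvR_split (vs : List (String × String)) :
    ∀ (cs : List Char) (cur : List Char),
      pvR vs true (pvPrependTok cur (pvSplitSyms cs)) = pvJ vs cur cs ++ pvL vs (pvT cur cs) := by
  intro cs
  induction cs with
  | nil => intro cur; simp [pvSplitSyms, pvPrependTok, pvR, pvJ, pvT]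
  | cons c cs ih =>
    intro cur
    have ihnil := ih []
    rw [pvPrependTok_nil _ (pvSplitSyms_ne_nil cs)] at ihnil
    simp only [pvSplitSyms, pvJ, pvT]
    by_cases h : c ∈ pvClass
    · simp [h, pvPrependTok, pvR, ihnil, List.append_assoc]
    · simp only [List.contains_iff_mem] at *
      rw [if_neg h, if_neg h, if_neg h, pvPrependTok_prepend, ih]

-- ===== VERDICT (by name: the statement is the Claim_ definition above) =====
theorem deflatten_py_spec : Claim_equal_deflatten_py := by
  intro expression vs _
  show deflatten_py expression vs = deflatten_py_alt expression vs
  unfold deflatten_py deflatten_py_alt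
  rw [pvStepA_eq vs, pvFoldA vs (expression.toList ++ [' ']) [] []]
  simp only [PySem.List.slice_to_neg_one, List.nil_append]
  rw [pvJ_append_space vs expression.toList []]
  rw [pvEnumR vs (pvSplitSyms expression.toList) 0,
      show ((0 : Int) % 2 == 0) = true from rfl,
      ← pvPrependTok_nil _ (pvSplitSyms_ne_nil expression.toList),
      pvR_split vs expression.toList []]
  simp
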